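-- pv_equiv track=rewrite | github.com/singhsameer2891-pixel/scope-tracker-cli | src/scope_tracker/scripts/sheet_manager.py | update_row
-- ===== SOURCE A (Python) =====
-- def update_row(
--     existing_row: dict,
--     changes: dict[str, str],
--     headers: list[str],
-- ) -> list[str]:
--     """Update specific cells in a row. Never touches user-owned columns.
--
--     Args:
--         existing_row: Dict of current row values.
--         changes: Dict of column_name -> new_value for columns to update.
--         headers: Full list of column headers.
--
--     Returns:
--         Full row list with changes applied.
--     """
--     # User-owned columns that must never be touched
--     user_owned = {"Blocker?", "Tester", "Test Date"}
--     for h in headers: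
--         if h.startswith("UAT #"):
--             user_owned.add(h)
--
--     updated = dict(existing_row)
--     for col, val in changes.items():
--         if col not in user_owned:
--             updated[col] = val
--
--     return [updated.get(h, "") for h in headers]
-- ===== SOURCE B (Python) =====
-- def update_row(
--     existing_row: dict,
--     changes: dict[str, str],
--     headers: list[str],
-- ) -> list[str]:
--     """Update specific cells in a row. Never touches user-owned columns."""
--     def protected(h: str) -> bool:
--         return h in ("Blocker?", "Tester", "Test Date") or h.startswith("UAT #")
--
--     return [
--         changes[h] if h in changes and not protected(h) else existing_row.get(h, "")
--         for h in headers
--     ]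
-- ===== Notes on version B (the rewrite author's own statement) =====
-- stated objective: simpler
-- what changed: B drops A's copied-and-mutated intermediate dict and its loop over changes.items(): it builds one per-header comprehension that consults changes by membership (taking changes[h] only when h is present and not protected, else existing_row.get(h, "")).
import Mathlib
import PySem

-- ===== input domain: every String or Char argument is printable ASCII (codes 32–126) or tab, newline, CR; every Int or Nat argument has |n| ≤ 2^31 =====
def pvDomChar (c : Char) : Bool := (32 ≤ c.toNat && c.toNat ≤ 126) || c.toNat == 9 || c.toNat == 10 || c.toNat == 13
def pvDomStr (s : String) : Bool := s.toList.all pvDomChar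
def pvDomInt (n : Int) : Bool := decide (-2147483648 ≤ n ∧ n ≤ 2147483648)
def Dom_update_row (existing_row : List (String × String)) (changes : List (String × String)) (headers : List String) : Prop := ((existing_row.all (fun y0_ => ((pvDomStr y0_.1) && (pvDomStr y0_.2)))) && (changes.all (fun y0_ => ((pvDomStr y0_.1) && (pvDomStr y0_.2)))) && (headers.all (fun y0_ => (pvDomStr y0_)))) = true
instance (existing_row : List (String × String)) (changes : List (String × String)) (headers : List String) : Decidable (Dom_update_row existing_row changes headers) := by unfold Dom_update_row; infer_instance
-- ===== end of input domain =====

-- B replaces A's copied-and-mutated intermediate dict and its loop over changes.items()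
-- with a single per-header comprehension consulting changes by membership (simpler decomposition).


-- ===== PORT A =====
def update_row (existing_row : List (String × String)) (changes : List (String × String)) (headers : List String) : List String :=
  -- user_owned = {"Blocker?","Tester","Test Date"}; for h in headers: if h.startswith("UAT #"): user_owned.add(h)
  let user_owned : PySem.Set String :=
    headers.foldl
      (fun s h => if PySem.Str.startswith h "UAT #" then PySem.Set.add s h else s)
      (PySem.Set.ofList ["Blocker?", "Tester", "Test Date"])
  -- updated = dict(existing_row); for col, val in changes.items(): if col not in user_owned: updated[col] = val
  let updated : PySem.Dict String String :=
    changes.foldl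
      (fun u p => if PySem.Set.contains user_owned p.1 then u else u.insert p.1 p.2)
      (PySem.Dict.mk existing_row)
  -- return [updated.get(h, "") for h in headers]
  headers.map (fun h => PySem.Dict.getD updated h "")

-- ===== PORT B =====
def update_row_alt (existing_row : List (String × String)) (changes : List (String × String)) (headers : List String) : List String :=
  headers.map (fun h =>
    if h == "Blocker?" || h == "Tester" || h == "Test Date" || PySem.Str.startswith h "UAT #" then
      PySem.Dict.getD (PySem.Dict.mk existing_row) h ""
    else
      match PySem.Dict.get? (PySem.Dict.mk changes) h with
      | some v => v
      | none => PySem.Dict.getD (PySem.Dict.mk existing_row) h "")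

-- ===== PRECONDITION & SPEC =====
-- Pre_ excludes only association lists whose `changes` keys repeat: a Python dict cannot have
-- duplicate keys, so no input the Python function accepts is excluded (it is a representation
-- artefact: A's dict overwrite would keep the last duplicate while first-match lookup keeps the first).
def Pre_update_row (existing_row : List (String × String)) (changes : List (String × String)) (headers : List String) : Prop :=
  (changes.map Prod.fst).Nodup
instance (existing_row : List (String × String)) (changes : List (String × String)) (headers : List String) : Decidable (Pre_update_row existing_row changes headers) := by unfold Pre_update_row; infer_instance
def pvWitness_update_row : (List (String × String)) × (List (String × String)) × List String :=
  ([("Status", "old"), ("Tester", "sam")], [("Status", "done"), ("Tester", "eve")], ["Status", "Tester", "UAT #1"])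

def Spec_update_row (existing_row : List (String × String)) (changes : List (String × String)) (headers : List String) (out : List String) : Prop := out = update_row_alt existing_row changes headers
instance (existing_row : List (String × String)) (changes : List (String × String)) (headers : List String) (out : List String) : Decidable (Spec_update_row existing_row changes headers out) := by unfold Spec_update_row; infer_instance

-- ===== CLAIM (what is proved, stated in full; the proofs are below) =====
def Claim_equal_update_row : Prop := ∀ (existing_row : List (String × String)) (changes : List (String × String)) (headers : List String), Dom_update_row existing_row changes headers → Pre_update_row existing_row changes headers → Spec_update_row existing_row changes headers (update_row existing_row changes headers)

-- ===== LEMMAS AND PROOFS =====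

-- membership in A's user_owned accumulator
theorem mem_uo_foldl (hs : List String) (s : PySem.Set String) (x : String) :
    x ∈ hs.foldl (fun s h => if PySem.Str.startswith h "UAT #" then PySem.Set.add s h else s) s ↔
      x ∈ s ∨ (x ∈ hs ∧ PySem.Str.startswith x "UAT #" = true) := by
  induction hs generalizing s with
  | nil => simp
  | cons h t ih =>
    simp only [List.foldl_cons, List.mem_cons, ih]
    by_cases hst : PySem.Str.startswith h "UAT #" = true
    · simp only [hst, if_pos, PySem.Set.mem_add]
      constructor
      · rintro (⟨hx | rfl⟩ | ⟨hxt, hsx⟩)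
        · exact Or.inl hx
        · exact Or.inr ⟨Or.inl rfl, hst⟩
        · exact Or.inr ⟨Or.inr hxt, hsx⟩
      · rintro (hx | ⟨rfl | hxt, hsx⟩)
        · exact Or.inl (Or.inl hx)
        · exact Or.inl (Or.inr rfl)
        · exact Or.inr ⟨hxt, hsx⟩
    · simp only [hst, if_neg, Bool.false_eq_true, not_false_iff]
      constructor
      · rintro (hx | ⟨hxt, hsx⟩)
        · exact Or.inl hx
        · exact Or.inr ⟨Or.inr hxt, hsx⟩
      · rintro (hx | ⟨rfl | hxt, hsx⟩)
        · exact Or.inl hx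
        · exact absurd hsx hst
        · exact Or.inr ⟨hxt, hsx⟩

-- a fold of guarded inserts does not change a lookup at a key absent from the fold's keys
theorem fold_getD_not_mem (C : String → Bool) (cs : List (String × String))
    (u : PySem.Dict String String) (h : String) (hm : h ∉ cs.map Prod.fst) :
    (cs.foldl (fun u p => if C p.1 then u else u.insert p.1 p.2) u).getD h "" = u.getD h "" := by
  induction cs generalizing u with
  | nil => rfl
  | cons c t ih =>
    simp only [List.map_cons, List.mem_cons, not_or] at hm
    simp only [List.foldl_cons]
    rw [ih _ hm.2]
    by_cases hc : C c.1 = true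
    · simp [hc]
    · simp only [hc, Bool.false_eq_true, if_neg, not_false_iff]
      rw [PySem.Dict.getD_insert]
      simp [hm.1]

-- characterisation of A's update loop at any key, for nodup change keys
theorem fold_getD (C : String → Bool) (cs : List (String × String))
    (u : PySem.Dict String String) (h : String) (hnd : (cs.map Prod.fst).Nodup) :
    (cs.foldl (fun u p => if C p.1 then u else u.insert p.1 p.2) u).getD h "" =
      match (PySem.Dict.mk cs).get? h with
      | some v => if C h then u.getD h "" else v
      | none => u.getD h "" := by
  induction cs generalizing u with
  | nil => rfl
  | cons c t ih =>
    obtain ⟨ck, cv⟩ := c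
    simp only [List.map_cons, List.nodup_cons] at hnd
    simp only [List.foldl_cons, PySem.Dict.get?_mk_cons]
    by_cases hck : ck = h
    · subst hck
      simp only [beq_self_eq_true, if_pos]
      rw [fold_getD_not_mem C t _ ck hnd.1]
      by_cases hc : C ck = true
      · simp [hc]
      · simp only [hc, Bool.false_eq_true, if_neg, not_false_iff]
        exact PySem.Dict.getD_insert_self _ _ _ _
    · have hbe : (ck == h) = false := by simp [hck]
      simp only [hbe, Bool.false_eq_true, if_neg, not_false_iff]
      rw [ih _ hnd.2]
      by_cases hc : C ck = true
      · simp [hc]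
      · simp only [hc, Bool.false_eq_true, if_neg, not_false_iff]
        rw [PySem.Dict.getD_insert]
        simp [Ne.symm hck]

-- ===== VERDICT (by name: the statement is the Claim_ definition above) =====
theorem update_row_spec : Claim_equal_update_row := by
  intro existing_row changes headers _ hpre
  unfold Spec_update_row update_row update_row_alt
  apply List.map_congr_left
  intro h hmem
  rw [fold_getD _ changes _ h hpre]
  have hC : (PySem.Set.contains
      (headers.foldl (fun s h => if PySem.Str.startswith h "UAT #" then PySem.Set.add s h else s)
        (PySem.Set.ofList ["Blocker?", "Tester", "Test Date"])) h)
      = (h == "Blocker?" || h == "Tester" || h == "Test Date" || PySem.Str.startswith h "UAT #") := by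
    by_cases hp : (h == "Blocker?" || h == "Tester" || h == "Test Date" || PySem.Str.startswith h "UAT #") = true
    · rw [hp]
      rw [PySem.Set.contains_iff, mem_uo_foldl]
      simp only [beq_iff_eq, Bool.or_eq_true] at hp
      rcases hp with ((rfl | rfl) | rfl) | hst
      · exact Or.inl (by simp [PySem.Set.mem_ofList])
      · exact Or.inl (by simp [PySem.Set.mem_ofList])
      · exact Or.inl (by simp [PySem.Set.mem_ofList])
      · exact Or.inr ⟨hmem, hst⟩
    · rw [eq_false_of_ne_true hp]
      rw [← Bool.not_eq_true, PySem.Set.contains_iff, mem_uo_foldl]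
      simp only [beq_iff_eq, Bool.or_eq_true, not_or] at hp
      rintro (hin | ⟨_, hst⟩)
      · rw [PySem.Set.mem_ofList] at hin
        simp only [List.mem_cons, List.not_mem_nil, or_false] at hin
        rcases hin with rfl | rfl | rfl
        · exact hp.1.1.1 rfl
        · exact hp.1.1.2 rfl
        · exact hp.1.2 rfl
      · exact hp.2 hst
  rw [hC]
  by_cases hp : (h == "Blocker?" || h == "Tester" || h == "Test Date" || PySem.Str.startswith h "UAT #") = true
  · simp only [hp, if_pos]
    cases (PySem.Dict.mk changes).get? h <;> simp
  · simp only [eq_false_of_ne_true hp, Bool.false_eq_true, if_neg, not_false_iff]
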